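-- pv_equiv track=rewrite | github.com/jobu-tupakii/ugong-isan | practice52.py | longest_detector
-- ===== SOURCE A (Python) =====
-- def longest_detector(text):
--     longest = ""
--     words = text.split()
--
--     for c in words:
--         if len(c) > len(longest):
--             longest = c
--
--         elif len(c) == len(longest):
--             if c > longest:
--                 longest = longest
--             elif c < longest:
--                 longest = c
--
--     return longest
-- ===== SOURCE B (Python) =====
-- def longest_detector(text):
--     words = sorted(text.split(), key=lambda w: (-len(w), w))
--     return words[0] if words else ""
-- ===== Notes on version B (the rewrite author's own statement) =====
-- stated objective: simpler
-- what changed: Replaces A's accumulator scan with explicit length/lexicographic branch logic by a one-line sort on the key (-len(w), w) and taking the first element.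
import Mathlib
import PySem

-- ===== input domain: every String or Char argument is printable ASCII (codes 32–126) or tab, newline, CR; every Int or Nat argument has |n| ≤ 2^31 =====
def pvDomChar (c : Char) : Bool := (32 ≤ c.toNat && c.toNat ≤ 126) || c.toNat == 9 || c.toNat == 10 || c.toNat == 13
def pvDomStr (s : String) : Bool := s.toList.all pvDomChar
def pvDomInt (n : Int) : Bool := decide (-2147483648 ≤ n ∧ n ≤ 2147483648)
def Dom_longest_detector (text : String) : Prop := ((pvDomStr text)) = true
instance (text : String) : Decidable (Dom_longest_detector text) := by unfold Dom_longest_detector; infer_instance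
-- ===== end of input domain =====

-- B replaces A's accumulator scan by sorting the word list on the key (-len(w), w) and taking its head (simpler decomposition).

-- ===== PORT A =====
-- loop body of A: longer word wins; on equal length the lexicographically smaller one
def ldStep (longest c : String) : String :=
  if PySem.Str.len c > PySem.Str.len longest then c
  else if PySem.Str.len c = PySem.Str.len longest then
    (if c > longest then longest else if c < longest then c else longest)
  else longest

def longest_detector (text : String) : String :=
  (PySem.Str.split₀ text).foldl ldStep ""

-- ===== PORT B =====
-- Python tuple key (-len(w), w) is the lexicographic order on the pair
def ldKey (w : String) : Int ×ₗ String := toLex (-(PySem.Str.len w : Int), w)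

def longest_detector_alt (text : String) : String :=
  match PySem.List.sorted (PySem.Str.split₀ text) ldKey with
  | [] => ""
  | w :: _ => w

-- ===== PRECONDITION & SPEC =====
def Spec_longest_detector (text : String) (out : String) : Prop := out = longest_detector_alt text
instance (text : String) (out : String) : Decidable (Spec_longest_detector text out) := by unfold Spec_longest_detector; infer_instance

-- ===== CLAIM (what is proved, stated in full; the proofs are below) =====
def Claim_equal_longest_detector : Prop := ∀ (text : String), Dom_longest_detector text → Spec_longest_detector text (longest_detector text)

-- ===== LEMMAS AND PROOFS =====

theorem ldKey_injective : Function.Injective ldKey := by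
  intro a b h
  have := congrArg (fun p => (ofLex p).2) h
  simpa [ldKey] using this

theorem ldKey_le_iff (a b : String) :
    ldKey a ≤ ldKey b ↔
      (-(PySem.Str.len a : Int) < -(PySem.Str.len b : Int) ∨
       (-(PySem.Str.len a : Int) = -(PySem.Str.len b : Int) ∧ a ≤ b)) := by
  simp [ldKey, Prod.Lex.toLex_le_toLex]

theorem ldStep_eq_or (acc c : String) : ldStep acc c = acc ∨ ldStep acc c = c := by
  unfold ldStep; split_ifs <;> simp

theorem ldStep_le_left (acc c : String) : ldKey (ldStep acc c) ≤ ldKey acc := by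
  unfold ldStep
  split_ifs with h1 h2 h3 h4 <;> rw [ldKey_le_iff]
  · exact Or.inl (by omega)
  · exact Or.inr ⟨rfl, le_refl _⟩
  · exact Or.inr ⟨by omega, le_of_lt h4⟩
  · exact Or.inr ⟨rfl, le_refl _⟩
  · exact Or.inr ⟨rfl, le_refl _⟩

theorem ldStep_le_right (acc c : String) : ldKey (ldStep acc c) ≤ ldKey c := by
  unfold ldStep
  split_ifs with h1 h2 h3 h4 <;> rw [ldKey_le_iff]
  · exact Or.inr ⟨rfl, le_refl _⟩
  · exact Or.inr ⟨by omega, le_of_lt h3⟩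
  · exact Or.inr ⟨rfl, le_refl _⟩
  · exact Or.inr ⟨by omega, not_lt.mp h4⟩
  · exact Or.inl (by omega)

theorem ld_fold_spec (ws : List String) (acc : String) :
    (ws.foldl ldStep acc = acc ∨ ws.foldl ldStep acc ∈ ws) ∧
    ldKey (ws.foldl ldStep acc) ≤ ldKey acc ∧
    ∀ y ∈ ws, ldKey (ws.foldl ldStep acc) ≤ ldKey y := by
  induction ws generalizing acc with
  | nil => simp
  | cons c t ih =>
    obtain ⟨hmem, hle, hall⟩ := ih (ldStep acc c)
    refine ⟨?_, le_trans hle (ldStep_le_left acc c), ?_⟩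
    · rcases hmem with h | h
      · rw [List.foldl_cons, h]
        rcases ldStep_eq_or acc c with h' | h'
        · exact Or.inl h'
        · exact Or.inr (by rw [h']; exact List.mem_cons_self)
      · exact Or.inr (List.mem_cons_of_mem _ h)
    · intro y hy
      rcases List.mem_cons.mp hy with rfl | hy
      · exact le_trans hle (ldStep_le_right acc y)
      · exact hall y hy

-- every piece produced by Python's str.split() is a nonempty word
theorem split₀_go_ne_nil (s cur : List Char) (acc : List (List Char))
    (hacc : ∀ w ∈ acc, w ≠ []) :
    ∀ w ∈ PySem.Chars.split₀.go s cur acc, w ≠ [] := by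
  induction s generalizing cur acc with
  | nil =>
    intro w hw
    rw [PySem.Chars.split₀.go] at hw
    split_ifs at hw with h
    · exact hacc w (by simpa using hw)
    · simp at hw
      rcases hw with h1 | h1
      · exact hacc w h1
      · subst h1; simpa [List.isEmpty_iff] using h
  | cons c rest ih =>
    intro w hw
    rw [PySem.Chars.split₀.go] at hw
    split_ifs at hw with h1 h2
    · exact ih [] acc hacc w hw
    · refine ih [] (cur.reverse :: acc) ?_ w hw
      intro x hx
      rcases List.mem_cons.mp hx with rfl | hx
      · simpa [List.isEmpty_iff] using h2
      · exact hacc x hx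
    · exact ih (c :: cur) acc hacc w hw

theorem mem_split₀_len_pos (text w : String) (hw : w ∈ PySem.Str.split₀ text) :
    0 < PySem.Str.len w := by
  unfold PySem.Str.split₀ at hw
  obtain ⟨cs, hcs, rfl⟩ := List.mem_map.mp hw
  have hne : cs ≠ [] := split₀_go_ne_nil text.toList [] [] (by simp) cs hcs
  have : (String.ofList cs).toList = cs := by simp
  rw [PySem.Str.len_eq, this]
  exact_mod_cast List.length_pos_iff.mpr hne

-- ===== VERDICT (by name: the statement is the Claim_ definition above) =====
theorem longest_detector_spec : Claim_equal_longest_detector := by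
  intro text _
  unfold Spec_longest_detector longest_detector longest_detector_alt
  cases hs : PySem.List.sorted (PySem.Str.split₀ text) ldKey with
  | nil =>
    have hnil : PySem.Str.split₀ text = [] :=
      (PySem.List.sorted_eq_nil_iff _ _ _).mp hs
    rw [hnil]
    rfl
  | cons m t =>
    simp only []
    have hmmem : m ∈ PySem.Str.split₀ text := by
      have : m ∈ PySem.List.sorted (PySem.Str.split₀ text) ldKey := by simp [hs]
      exact (PySem.List.mem_sorted _ _ _ _).mp this
    have hmin : ∀ y ∈ PySem.Str.split₀ text, ldKey m ≤ ldKey y :=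
      PySem.List.key_head_sorted_le _ _ hs
    obtain ⟨hmem, hle, hall⟩ := ld_fold_spec (PySem.Str.split₀ text) ""
    set r := (PySem.Str.split₀ text).foldl ldStep "" with hr
    have hrmem : r ∈ PySem.Str.split₀ text := by
      rcases hmem with h | h
      · exfalso
        have h1 : ldKey "" ≤ ldKey m := h ▸ hall m hmmem
        have hm0 : 0 < PySem.Str.len m := mem_split₀_len_pos text m hmmem
        rw [ldKey_le_iff] at h1
        have h0 : PySem.Str.len "" = 0 := rfl
        rw [h0] at h1
        rcases h1 with h1 | ⟨h1, _⟩ <;> omega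
      · exact h
    have h1 : ldKey r ≤ ldKey m := hall m hmmem
    have h2 : ldKey m ≤ ldKey r := hmin r hrmem
    exact ldKey_injective (le_antisymm h1 h2)
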